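-- pv_equiv track=rewrite | github.com/JacksonGreenNZ/PUCV-CIIRID-IDEA | test_file.py | split_contiguous
-- ===== SOURCE A (Python) =====
-- def split_contiguous(times, mask):
--     """
--     Split times into contiguous segments where mask == True
--     """
--     segments = []
--     current = []
--
--     for t, keep in zip(times, mask):
--         if keep:
--             current.append(t)
--         elif current:
--             segments.append(current)
--             current = []
--
--     if current:
--         segments.append(current)
--
--     return segments
-- ===== SOURCE B (Python) =====
-- def split_contiguous(times, mask):
--     """
--     Split times into contiguous segments where mask == True
--     """
--     n = min(len(times), len(mask))
--     m = [bool(v) for v in mask[:n]]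
--     starts = [i for i in range(n) if m[i] and (i == 0 or not m[i - 1])]
--     ends = [i + 1 for i in range(n) if m[i] and (i == n - 1 or not m[i + 1])]
--     return [times[s:e] for s, e in zip(starts, ends)]
-- ===== Notes on version B (the rewrite author's own statement) =====
-- stated objective: alternative
-- what changed: Instead of a single pass with a current/flush accumulator, B computes the run boundary indices in two staged index-filter passes (starts where the mask turns True, ends where it turns False) and then extracts each segment by slicing times between paired boundaries.
import Mathlib
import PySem

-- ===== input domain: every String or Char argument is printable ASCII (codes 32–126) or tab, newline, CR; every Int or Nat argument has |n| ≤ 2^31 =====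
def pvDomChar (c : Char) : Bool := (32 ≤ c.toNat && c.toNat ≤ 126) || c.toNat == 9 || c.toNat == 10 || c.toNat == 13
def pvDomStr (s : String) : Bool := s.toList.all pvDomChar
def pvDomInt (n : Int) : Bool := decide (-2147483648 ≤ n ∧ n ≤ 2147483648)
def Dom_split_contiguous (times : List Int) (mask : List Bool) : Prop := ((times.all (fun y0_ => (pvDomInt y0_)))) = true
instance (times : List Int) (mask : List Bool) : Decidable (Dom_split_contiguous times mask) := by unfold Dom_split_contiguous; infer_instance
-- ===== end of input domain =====

-- B replaces A's single-pass current/flush accumulator with a boundary-index algorithm: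
-- staged passes compute the run start and end indices, then slicing extracts the segments (alternative; same cost).

-- ===== PORT A =====
-- the for-loop over zip(times, mask), carrying (segments, current)
def splitLoopA : List (Int × Bool) → List (List Int) × List Int → List (List Int) × List Int
  | [], sc => sc
  | (t, keep) :: rest, (segs, cur) =>
    if keep then splitLoopA rest (segs, cur ++ [t])
    else if !cur.isEmpty then splitLoopA rest (segs ++ [cur], [])
    else splitLoopA rest (segs, cur)

def split_contiguous (times : List Int) (mask : List Bool) : List (List Int) :=
  let sc := splitLoopA (times.zip mask) ([], [])
  if !sc.2.isEmpty then sc.1 ++ [sc.2] else sc.1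

-- ===== PORT B =====
-- n = min(len(times), len(mask)); m = [bool(v) for v in mask[:n]] (mask elements are already Bool)
-- starts/ends are index-comprehension filters over range(n); times[s:e] with 0 ≤ s, 0 ≤ e is
-- exactly (times.drop s).take (e - s) (Python clamps, and e ≤ s gives []).
def split_contiguous_alt (times : List Int) (mask : List Bool) : List (List Int) :=
  let n := min times.length mask.length
  let m := mask.take n
  let starts := (List.range n).filter (fun i => m.getD i false && (i == 0 || !(m.getD (i - 1) false)))
  let ends := ((List.range n).filter (fun i => m.getD i false && (i == n - 1 || !(m.getD (i + 1) false)))).map (· + 1)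
  (starts.zip ends).map (fun se => (times.drop se.1).take (se.2 - se.1))

-- ===== PRECONDITION & SPEC =====
def Spec_split_contiguous (times : List Int) (mask : List Bool) (out : List (List Int)) : Prop := out = split_contiguous_alt times mask
instance (times : List Int) (mask : List Bool) (out : List (List Int)) : Decidable (Spec_split_contiguous times mask out) := by unfold Spec_split_contiguous; infer_instance

-- ===== CLAIM (what is proved, stated in full; the proofs are below) =====
def Claim_equal_split_contiguous : Prop := ∀ (times : List Int) (mask : List Bool), Dom_split_contiguous times mask → Spec_split_contiguous times mask (split_contiguous times mask)

-- ===== LEMMAS AND PROOFS =====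

-- canonical run decomposition of a pair list, used as the middle point of the proof
def groupRuns : List (Int × Bool) → List (Bool × List Int)
  | [] => []
  | (t, k) :: rest =>
    (k, t :: (rest.takeWhile (fun p => p.2 == k)).map Prod.fst) ::
      groupRuns (rest.dropWhile (fun p => p.2 == k))
termination_by l => l.length
decreasing_by
  simp only [List.length_cons]
  exact Nat.lt_succ_of_le (List.length_dropWhile_le _ _)

def altOn (l : List (Int × Bool)) : List (List Int) :=
  ((groupRuns l).filter (fun g => g.1)).map (fun g => g.2)

-- A's final flush, applied to the loop state
def finishA (sc : List (List Int) × List Int) : List (List Int) :=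
  if !sc.2.isEmpty then sc.1 ++ [sc.2] else sc.1

lemma splitLoopA_cons_true (t : Int) (r : List (Int × Bool)) (segs : List (List Int)) (cur : List Int) :
    splitLoopA ((t, true) :: r) (segs, cur) = splitLoopA r (segs, cur ++ [t]) := by
  simp [splitLoopA]

lemma splitLoopA_cons_false_nil (t : Int) (r : List (Int × Bool)) (segs : List (List Int)) :
    splitLoopA ((t, false) :: r) (segs, []) = splitLoopA r (segs, []) := by
  simp [splitLoopA]

lemma splitLoopA_cons_false_ne (t : Int) (r : List (Int × Bool)) (segs : List (List Int))
    (cur : List Int) (hc : cur ≠ []) :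
    splitLoopA ((t, false) :: r) (segs, cur) = splitLoopA r (segs ++ [cur], []) := by
  simp [splitLoopA, hc]

lemma altOn_false_cons (t : Int) (r : List (Int × Bool)) :
    altOn ((t, false) :: r) = altOn r := by
  have key : ∀ n (r : List (Int × Bool)), r.length ≤ n →
      altOn (r.dropWhile (fun p => p.2 == false)) = altOn r := by
    intro n
    induction n with
    | zero =>
      intro r hr
      have : r = [] := List.length_eq_zero_iff.mp (Nat.le_zero.mp hr)
      subst this; rfl
    | succ n ih =>
      intro r hr
      match r with
      | [] => rfl
      | (t', k) :: r' =>
        have h2 := ih r' (by simpa using Nat.le_of_succ_le_succ hr)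
        cases k with
        | true => simp [List.dropWhile]
        | false =>
          have h1 : altOn ((t', false) :: r') =
              altOn (r'.dropWhile (fun p => p.2 == false)) := by
            simp [altOn, groupRuns]
          have h3 : ((t', false) :: r').dropWhile (fun p => p.2 == false) =
              r'.dropWhile (fun p => p.2 == false) := by
            simp [List.dropWhile]
          rw [h3, h2, h1, h2]
  have h1 : altOn ((t, false) :: r) = altOn (r.dropWhile (fun p => p.2 == false)) := by
    simp [altOn, groupRuns]
  rw [h1, key r.length r le_rfl]

lemma loop_spec : ∀ n (l : List (Int × Bool)), l.length ≤ n →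
    (∀ segs, finishA (splitLoopA l (segs, [])) = segs ++ altOn l) ∧
    (∀ segs cur, cur ≠ [] →
      finishA (splitLoopA l (segs, cur)) =
        segs ++ (cur ++ (l.takeWhile (fun p => p.2 == true)).map Prod.fst) ::
          altOn (l.dropWhile (fun p => p.2 == true))) := by
  intro n
  induction n with
  | zero =>
    intro l hl
    have : l = [] := List.length_eq_zero_iff.mp (Nat.le_zero.mp hl)
    subst this
    refine ⟨fun segs => by simp [splitLoopA, finishA, altOn, groupRuns],
            fun segs cur hc => by simp [splitLoopA, finishA, altOn, groupRuns, hc]⟩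
  | succ n ih =>
    intro l hl
    match l with
    | [] =>
      refine ⟨fun segs => by simp [splitLoopA, finishA, altOn, groupRuns],
              fun segs cur hc => by simp [splitLoopA, finishA, altOn, groupRuns, hc]⟩
    | (t, k) :: r =>
      have hr : r.length ≤ n := by simpa using Nat.le_of_succ_le_succ hl
      have IH := ih r hr
      constructor
      · intro segs
        cases k with
        | true =>
          rw [splitLoopA_cons_true, List.nil_append, IH.2 segs [t] (by simp)]
          simp [altOn, groupRuns]
        | false =>
          rw [splitLoopA_cons_false_nil, IH.1 segs, altOn_false_cons]
      · intro segs cur hc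
        cases k with
        | true =>
          rw [splitLoopA_cons_true, IH.2 segs (cur ++ [t]) (by simp)]
          simp [List.dropWhile, List.append_assoc]
        | false =>
          rw [splitLoopA_cons_false_ne t r segs cur hc, IH.1 (segs ++ [cur])]
          simp [List.takeWhile, altOn_false_cons]

-- ----- B side: recursive characterisations of the boundary-index lists -----

-- indices (relative) where a run starts, given the previous mask value
def sIdx (prev : Bool) : List Bool → List Nat
  | [] => []
  | b :: m' => (if b && !prev then [0] else []) ++ (sIdx b m').map (· + 1)

-- values i+1 for the indices i where a run ends
def eIdx : List Bool → List Nat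
  | [] => []
  | b :: m' => (if b && !(m'.head?.getD false) then [1] else []) ++ (eIdx m').map (· + 1)

def sliceMap (t : List Int) (ps : List (Nat × Nat)) : List (List Int) :=
  ps.map (fun p => (t.drop p.1).take (p.2 - p.1))

lemma startsEq (prev : Bool) (m : List Bool) :
    (List.range m.length).filter
        (fun i => m.getD i false && ((i == 0 && !prev) || !(m.getD (i - 1) false))) = sIdx prev m := by
  induction m generalizing prev with
  | nil => rfl
  | cons b m' ih =>
    rw [List.length_cons, List.range_succ_eq_map, List.filter_cons, List.filter_map]
    have hpred : (((fun i => (b :: m').getD i false &&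
            ((i == 0 && !prev) || !((b :: m').getD (i - 1) false))) ∘ (· + 1)) : Nat → Bool)
        = (fun i => m'.getD i false && ((i == 0 && !b) || !(m'.getD (i - 1) false))) := by
      funext i
      cases i with
      | zero =>
        cases hx : m'.getD 0 false <;> cases b <;> simp_all [List.getD]
      | succ j => simp [List.getD]
    have h0 : ((b :: m').getD 0 false && ((0 == 0 && !prev) || !((b :: m').getD (0 - 1) false)))
        = (b && !prev) := by
      cases b <;> cases prev <;> simp [List.getD]
    rw [hpred, ih b, h0]
    cases hb : (b && !prev) <;> simp [sIdx, hb]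

lemma endsEq (m : List Bool) :
    ((List.range m.length).filter
        (fun i => m.getD i false && (i == m.length - 1 || !(m.getD (i + 1) false)))).map (· + 1)
      = eIdx m := by
  induction m with
  | nil => rfl
  | cons b m' ih =>
    rw [List.length_cons, List.range_succ_eq_map, List.filter_cons, List.filter_map]
    have hpred : List.filter
          ((fun i => (b :: m').getD i false &&
            (i == m'.length + 1 - 1 || !((b :: m').getD (i + 1) false))) ∘ Nat.succ)
          (List.range m'.length)
        = List.filter
            (fun i => m'.getD i false && (i == m'.length - 1 || !(m'.getD (i + 1) false)))
            (List.range m'.length) := by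
      apply List.filter_congr
      intro i hi
      have hilt : i < m'.length := List.mem_range.mp hi
      have h1 : ((i.succ : Nat) == m'.length + 1 - 1) = (i == m'.length - 1) := by
        have h2 : (i + 1 = m'.length) ↔ (i = m'.length - 1) := by omega
        simp [Nat.succ_eq_add_one, h2]
      simp only [Function.comp_apply, List.getD, List.getElem?_cons_succ, h1, Nat.succ_eq_add_one]
    have h0 : ((b :: m').getD 0 false &&
          ((0 : Nat) == m'.length + 1 - 1 || !((b :: m').getD (0 + 1) false)))
        = (b && !(m'.head?.getD false)) := by
      cases m' with
      | nil => cases b <;> simp [List.getD]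
      | cons c m'' => cases b <;> cases c <;> simp [List.getD]
    rw [hpred, h0]
    cases hb : (b && !(m'.head?.getD false)) <;>
      simp [eIdx, hb, ← ih, List.map_map, Function.comp_def, Nat.succ_eq_add_one]

lemma sIdx_run (j : Nat) (r : List Bool) :
    sIdx true (List.replicate j true ++ r) = (sIdx true r).map (· + j) := by
  induction j with
  | zero => simp
  | succ j ih =>
    simp only [List.replicate_succ, List.cons_append, sIdx, ih, List.map_map]
    simp [Function.comp_def, Nat.add_assoc]

lemma eIdx_run_term (j : Nat) : eIdx (List.replicate (j + 1) true) = [j + 1] := by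
  induction j with
  | zero => simp [eIdx]
  | succ j ih =>
    rw [List.replicate_succ, eIdx, ih]
    simp [List.replicate_succ]

lemma eIdx_run (j : Nat) (r : List Bool) :
    eIdx (List.replicate (j + 1) true ++ false :: r)
      = (j + 1) :: (eIdx r).map (· + (j + 2)) := by
  induction j with
  | zero =>
    simp only [List.replicate_succ, List.replicate_zero, List.nil_append, List.cons_append, eIdx]
    simp [List.map_map, Function.comp_def]
  | succ j ih =>
    rw [List.replicate_succ, List.cons_append, eIdx, ih]
    have hh2 : (List.replicate (j + 1) true).head?.getD false = true := by
      rw [List.replicate_succ]; rfl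
    have hf : (fun x => x + (j + 2) + 1) = (fun x : Nat => x + (j + 1 + 2)) := by
      funext x; omega
    simp [hh2, List.map_map, Function.comp_def, hf]

lemma zip_takeWhile_run (j : Nat) (t : List Int) (r : List Bool)
    (hr : r.head?.getD false = false) :
    (t.zip (List.replicate j true ++ r)).takeWhile (fun p => p.2 == true)
      = (t.take j).zip (List.replicate j true) := by
  induction j generalizing t with
  | zero =>
    cases t with
    | nil => simp
    | cons x t' =>
      cases r with
      | nil => simp
      | cons b r' =>
        have : b = false := by simpa using hr
        subst this
        simp
  | succ j ih =>
    cases t with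
    | nil => simp
    | cons x t' =>
      simp only [List.replicate_succ, List.cons_append, List.zip_cons_cons, List.takeWhile_cons,
        List.take_succ_cons]
      simpa using ih t'

lemma zip_dropWhile_run (j : Nat) (t : List Int) (r : List Bool)
    (hr : r.head?.getD false = false) :
    (t.zip (List.replicate j true ++ r)).dropWhile (fun p => p.2 == true)
      = (t.drop j).zip r := by
  induction j generalizing t with
  | zero =>
    cases t with
    | nil => cases r <;> simp
    | cons x t' =>
      cases r with
      | nil => simp
      | cons b r' =>
        have : b = false := by simpa using hr
        subst this
        simp
  | succ j ih =>
    cases t with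
    | nil => simp
    | cons x t' =>
      simp only [List.replicate_succ, List.cons_append, List.zip_cons_cons, List.dropWhile_cons,
        List.drop_succ_cons]
      simpa using ih t'

lemma eIdx_le (m : List Bool) : ∀ e ∈ eIdx m, e ≤ m.length := by
  induction m with
  | nil => simp [eIdx]
  | cons b m' ih =>
    intro e he
    rw [eIdx] at he
    rcases List.mem_append.mp he with h | h
    · split at h <;> simp_all
    · rcases List.mem_map.mp h with ⟨e', he', rfl⟩
      have := ih e' he'
      simp; omega

lemma dropWhile_head_false (l : List Bool) :
    ((l.dropWhile (fun b => b)).head?.getD false) = false := by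
  induction l with
  | nil => rfl
  | cons c l' ih => cases c <;> simp [List.dropWhile, ih]

lemma sIdx_false_cons (b : Bool) (m' : List Bool) :
    sIdx b (false :: m') = (sIdx false m').map (· + 1) := by
  simp [sIdx]

lemma eIdx_false_cons (m' : List Bool) :
    eIdx (false :: m') = (eIdx m').map (· + 1) := by
  simp [eIdx]

lemma main_runs : ∀ N (m : List Bool) (t : List Int), m.length ≤ N → t.length = m.length →
    sliceMap t ((sIdx false m).zip (eIdx m)) = altOn (t.zip m) := by
  intro N
  induction N with
  | zero =>
    intro m t hm ht
    have hm0 : m = [] := List.length_eq_zero_iff.mp (Nat.le_zero.mp hm)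
    subst hm0
    have ht0 : t = [] := List.length_eq_zero_iff.mp ht
    subst ht0
    simp [sliceMap, altOn, groupRuns, sIdx, eIdx]
  | succ N ih =>
    intro m t hm ht
    match m, t with
    | [], t =>
      have ht0 : t = [] := List.length_eq_zero_iff.mp ht
      subst ht0
      simp [sliceMap, altOn, groupRuns, sIdx, eIdx]
    | b :: m', t =>
      match t with
      | [] => simp at ht
      | x :: t' =>
        have ht' : t'.length = m'.length := by simpa using ht
        cases b with
        | false =>
          rw [sIdx_false_cons, eIdx_false_cons, List.zip_map]
          have htail : sliceMap (x :: t')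
                (((sIdx false m').zip (eIdx m')).map (Prod.map (· + 1) (· + 1)))
              = sliceMap t' ((sIdx false m').zip (eIdx m')) := by
            unfold sliceMap
            rw [List.map_map]
            apply List.map_congr_left
            intro p _
            simp [Prod.map, Nat.succ_sub_succ]
          rw [htail, List.zip_cons_cons, altOn_false_cons]
          exact ih m' t' (by simpa using Nat.le_of_succ_le_succ hm) ht'
        | true =>
          -- decompose m' into its leading true-run and the rest
          set j := (m'.takeWhile (fun b => b)).length with hj
          set r := m'.dropWhile (fun b => b) with hrdef
          have htw : m'.takeWhile (fun b => b) = List.replicate j true := by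
            rw [List.eq_replicate_iff]
            exact ⟨rfl, fun c hc => by simpa using List.mem_takeWhile_imp hc⟩
          have hsplit : List.replicate j true ++ r = m' := by
            rw [← htw, hrdef, List.takeWhile_append_dropWhile]
          have hrhead : r.head?.getD false = false := dropWhile_head_false m'
          have hS : sIdx false (true :: m') = 0 :: (sIdx true m').map (· + 1) := by
            simp [sIdx]
          have hE0 : eIdx (true :: m') = eIdx (List.replicate (j + 1) true ++ r) := by
            rw [List.replicate_succ, List.cons_append, hsplit]
          -- the head of the altOn side
          have hTW : ((t'.zip m').takeWhile (fun p => p.2 == true)).map Prod.fst = t'.take j := by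
            rw [← hsplit, zip_takeWhile_run j t' r hrhead]
            exact List.map_fst_zip (by simp)
          have hDW : (t'.zip m').dropWhile (fun p => p.2 == true) = (t'.drop j).zip r := by
            rw [← hsplit, zip_dropWhile_run j t' r hrhead]
          have hjle : j ≤ m'.length := by
            rw [← hsplit]; simp
          have haltcons : altOn ((x :: t').zip (true :: m'))
              = (x :: t'.take j) :: altOn ((t'.drop j).zip r) := by
            rw [List.zip_cons_cons]
            show altOn ((x, true) :: t'.zip m') = _
            have hTW' : List.map Prod.fst (List.takeWhile (fun p : Int × Bool => p.2) (t'.zip m'))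
                = List.take j t' := by simpa using hTW
            have hDW' : List.dropWhile (fun p : Int × Bool => p.2) (t'.zip m')
                = (List.drop j t').zip r := by simpa using hDW
            simp [altOn, groupRuns, hTW', hDW']
          cases hr : r with
          | nil =>
            -- m' is a pure run of j trues
            have hm' : m' = List.replicate j true := by rw [← hsplit, hr, List.append_nil]
            have hSz : sIdx true m' = [] := by
              rw [hm']
              have := sIdx_run j ([] : List Bool)
              simpa using this
            have hEz : eIdx (true :: m') = [j + 1] := by
              rw [hE0, hr, List.append_nil, eIdx_run_term]
            rw [hS, hSz, hEz]
            have hlhs : sliceMap (x :: t') ([(0, j + 1)]) = [x :: t'.take j] := by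
              simp [sliceMap]
            rw [haltcons, hr]
            simp [hlhs, altOn, groupRuns]
          | cons c r' =>
            have hc : c = false := by
              rw [hr] at hrhead; simpa using hrhead
            subst hc
            have hm' : m' = List.replicate j true ++ false :: r' := by rw [← hsplit, hr]
            -- B-side boundary lists
            have hSz : sIdx true m' = (sIdx false r').map (· + (j + 1)) := by
              rw [hm', sIdx_run, sIdx_false_cons, List.map_map]
              apply List.map_congr_left
              intro a _
              simp only [Function.comp_apply]
              omega
            have hEz : eIdx (true :: m') = (j + 1) :: (eIdx r').map (· + (j + 2)) := by
              rw [hE0, hr, eIdx_run]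
            have hSfull : sIdx false (true :: m') = 0 :: (sIdx false r').map (· + (j + 2)) := by
              rw [hS, hSz, List.map_map]
              have hcmp : ((fun x => x + 1) ∘ (fun x : Nat => x + (j + 1)))
                  = (fun x : Nat => x + (j + 2)) := by
                funext a; simp only [Function.comp_apply]; omega
              rw [hcmp]
            rw [hSfull, hEz, List.zip_cons_cons, List.zip_map]
            have hlen' : t'.length = j + 1 + r'.length := by
              rw [ht', hm']; simp; omega
            have hdropj : t'.drop j = t'[j]! :: t'.drop (j + 1) := by
              have hjlt : j < t'.length := by omega
              rw [List.drop_eq_getElem_cons hjlt]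
              simp [List.getElem!_eq_getElem?_getD, List.getElem?_eq_getElem hjlt]
            have htail : sliceMap (x :: t')
                  (((sIdx false r').zip (eIdx r')).map (Prod.map (· + (j + 2)) (· + (j + 2))))
                = sliceMap (t'.drop (j + 1)) ((sIdx false r').zip (eIdx r')) := by
              unfold sliceMap
              rw [List.map_map]
              apply List.map_congr_left
              intro p _
              have hdd : (x :: t').drop (p.1 + (j + 2)) = (t'.drop (j + 1)).drop p.1 := by
                rw [List.drop_drop]
                have h9 : p.1 + (j + 2) = (p.1 + (j + 1)) + 1 := by omega
                rw [h9, List.drop_succ_cons]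
                congr 1
                omega
              have har : p.2 + (j + 2) - (p.1 + (j + 2)) = p.2 - p.1 := by omega
              simp [Prod.map, hdd, har]
            have hIH : sliceMap (t'.drop (j + 1)) ((sIdx false r').zip (eIdx r'))
                = altOn ((t'.drop (j + 1)).zip r') := by
              apply ih
              · have : m'.length ≤ N := by simpa using Nat.le_of_succ_le_succ hm
                rw [hm'] at this; simp at this; omega
              · rw [List.length_drop]; omega
            rw [haltcons, hr, hdropj, List.zip_cons_cons, altOn_false_cons]
            simp only [sliceMap, List.map_cons] at *
            rw [htail, hIH]
            simp

lemma zip_take_min (t : List Int) (m : List Bool) :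
    t.zip m = (t.take (min t.length m.length)).zip (m.take (min t.length m.length)) := by
  induction t generalizing m with
  | nil => simp
  | cons x t' ih =>
    cases m with
    | nil => simp
    | cons b m' =>
      simp only [List.length_cons, Nat.succ_min_succ, List.take_succ_cons, List.zip_cons_cons]
      rw [← ih]

theorem split_contiguous_spec : Claim_equal_split_contiguous := by
  intro times mask _
  show split_contiguous times mask = split_contiguous_alt times mask
  -- A equals the canonical run decomposition
  have hA : split_contiguous times mask = altOn (times.zip mask) := by
    have h := (loop_spec (times.zip mask).length (times.zip mask) le_rfl).1 []
    simpa [split_contiguous, finishA] using h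
  -- abbreviations from B's definition
  set n := min times.length mask.length with hn
  set m := mask.take n with hm
  have hmlen : m.length = n := by
    rw [hm, List.length_take]
    omega
  -- B equals sliceMap over the boundary lists
  have hB : split_contiguous_alt times mask
      = sliceMap times ((sIdx false m).zip (eIdx m)) := by
    simp only [split_contiguous_alt]
    rw [← hn, ← hm]
    have hs : (List.range n).filter (fun i => m.getD i false && (i == 0 || !(m.getD (i - 1) false)))
        = sIdx false m := by
      rw [← hmlen, ← startsEq false m]
      apply List.filter_congr
      intro i _
      simp
    have he : ((List.range n).filter (fun i => m.getD i false && (i == n - 1 || !(m.getD (i + 1) false)))).map (· + 1)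
        = eIdx m := by
      rw [← hmlen, ← endsEq m]
    rw [hs, he]
    rfl
  -- slicing the full times agrees with slicing its first n elements
  have hslice : sliceMap times ((sIdx false m).zip (eIdx m))
      = sliceMap (times.take n) ((sIdx false m).zip (eIdx m)) := by
    unfold sliceMap
    apply List.map_congr_left
    intro p hp
    have hple : p.2 ≤ n := by
      have := eIdx_le m p.2 (List.of_mem_zip hp).2
      omega
    have h1 : (times.take n).drop p.1 = (times.drop p.1).take (n - p.1) := by
      rw [List.drop_take]
    rw [h1, List.take_take]
    have : min (p.2 - p.1) (n - p.1) = p.2 - p.1 := by omega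
    rw [this]
  have hmain : sliceMap (times.take n) ((sIdx false m).zip (eIdx m))
      = altOn ((times.take n).zip m) := by
    apply main_runs m.length m (times.take n) le_rfl
    rw [List.length_take, hmlen]
    omega
  have hzip : times.zip mask = (times.take n).zip m := by
    rw [hm, hn]
    exact zip_take_min times mask
  rw [hA, hB, hslice, hmain, ← hzip]
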